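-- pv_equiv track=rewrite | github.com/mtmbutler/leetcode | solutions/lc_1028_recover_a_tree_from_preorder_traversal.py | split_into_list
-- ===== SOURCE A (Python) =====
-- def split_into_list(s):
--     li = [[]]
--     last = ''
--     for ch in s:
--         if ch == '-' and last != '-':
--             li.append([ch])
--         else:
--             li[-1].append(ch)
--         last = ch
--     li = [''.join(subli) for subli in li]
--     return li
-- ===== SOURCE B (Python) =====
-- def split_into_list(s):
--     # Span-based: take the leading non-dash run as the prefix token, then
--     # repeatedly consume a dash-run followed by a non-dash run as one token.
--     def take_while(pred, t):
--         i = 0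
--         while i < len(t) and pred(t[i]):
--             i += 1
--         return t[:i], t[i:]
--
--     prefix, rest = take_while(lambda c: c != '-', s)
--     out = [prefix]
--     while rest:
--         d, r = take_while(lambda c: c == '-', rest)
--         w, rest = take_while(lambda c: c != '-', r)
--         out.append(d + w)
--     return out
-- ===== Notes on version B (the rewrite author's own statement) =====
-- stated objective: alternative
-- what changed: Replaces A's per-character fold that appends into the last sublist (tracking the previous character) with a span/run decomposition: take the leading non-dash run as the prefix token, then repeatedly consume one dash-run plus the following non-dash run per token.
import Mathlib
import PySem

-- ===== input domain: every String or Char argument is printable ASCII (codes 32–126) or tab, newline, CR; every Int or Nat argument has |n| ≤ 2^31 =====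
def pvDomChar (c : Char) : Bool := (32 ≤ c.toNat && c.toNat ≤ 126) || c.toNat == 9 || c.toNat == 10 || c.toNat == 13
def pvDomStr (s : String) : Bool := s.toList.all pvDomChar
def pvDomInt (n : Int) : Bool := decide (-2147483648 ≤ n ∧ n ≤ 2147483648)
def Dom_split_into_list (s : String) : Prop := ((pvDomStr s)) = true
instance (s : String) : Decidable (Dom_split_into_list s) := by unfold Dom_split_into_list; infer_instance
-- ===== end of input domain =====

-- B replaces A's per-character fold (append into last sublist, tracking the previous
-- character) with a span/run decomposition: prefix non-dash run, then one dash-run +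
-- non-dash run per token. Objective: alternative (same O(n) cost).


-- ===== PORT A =====
-- li[-1].append(ch): append ch to the last sublist (li is never empty in A)
def pvAppendLast (li : List (List Char)) (c : Char) : List (List Char) :=
  match li with
  | [] => []
  | [x] => [x ++ [c]]
  | x :: xs => x :: pvAppendLast xs c

-- one loop iteration: state is (li, last)
def pvStepA (st : List (List Char) × String) (ch : Char) : List (List Char) × String :=
  if ch = '-' ∧ st.2 ≠ "-" then (st.1 ++ [[ch]], String.ofList [ch])
  else (pvAppendLast st.1 ch, String.ofList [ch])

def split_into_list (s : String) : List String :=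
  let r := s.toList.foldl pvStepA ([[]], "")
  r.1.map (fun subli => String.ofList subli)   -- ''.join(subli)

-- ===== PORT B =====
-- the outer while loop of Source B: each round takes a dash-run then a non-dash run
def pvGo (l : List Char) : List String :=
  match l with
  | [] => []
  | c :: rest =>
    let d := (c :: rest).takeWhile (fun x => x == '-')
    let r := (c :: rest).dropWhile (fun x => x == '-')
    let w := r.takeWhile (fun x => x != '-')
    String.ofList (d ++ w) :: pvGo (r.dropWhile (fun x => x != '-'))
termination_by l.length
decreasing_by
  by_cases hc : c == '-'
  · have h1 : ((c :: rest).dropWhile (fun x => x == '-')) = rest.dropWhile (fun x => x == '-') := by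
      simp [hc]
    calc (((c :: rest).dropWhile (fun x => x == '-')).dropWhile (fun x => x != '-')).length
        ≤ ((c :: rest).dropWhile (fun x => x == '-')).length := List.length_dropWhile_le _ _
      _ = (rest.dropWhile (fun x => x == '-')).length := by rw [h1]
      _ ≤ rest.length := List.length_dropWhile_le _ _
      _ < (c :: rest).length := by simp
  · have h1 : ((c :: rest).dropWhile (fun x => x == '-')) = c :: rest := by
      simp [hc]
    have h2 : (c != '-') = true := by simpa using hc
    rw [h1]
    have h3 : ((c :: rest).dropWhile (fun x => x != '-')) = rest.dropWhile (fun x => x != '-') := by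
      simp [h2]
    rw [h3]
    calc (rest.dropWhile (fun x => x != '-')).length
        ≤ rest.length := List.length_dropWhile_le _ _
      _ < (c :: rest).length := by simp

def split_into_list_alt (s : String) : List String :=
  let cs := s.toList
  String.ofList (cs.takeWhile (fun x => x != '-')) :: pvGo (cs.dropWhile (fun x => x != '-'))

-- ===== PRECONDITION & SPEC =====
def Spec_split_into_list (s : String) (out : List String) : Prop := out = split_into_list_alt s
instance (s : String) (out : List String) : Decidable (Spec_split_into_list s out) := by unfold Spec_split_into_list; infer_instance

-- ===== CLAIM (what is proved, stated in full; the proofs are below) =====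
def Claim_equal_split_into_list : Prop := ∀ (s : String), Dom_split_into_list s → Spec_split_into_list s (split_into_list s)

-- ===== LEMMAS AND PROOFS =====

theorem pvAppendLast_eq (front : List (List Char)) (cur : List Char) (c : Char) :
    pvAppendLast (front ++ [cur]) c = front ++ [cur ++ [c]] := by
  induction front with
  | nil => simp [pvAppendLast]
  | cons f fs ih =>
    cases fs with
    | nil => simp [pvAppendLast]
    | cons g gs =>
      have h1 : pvAppendLast ((f :: g :: gs) ++ [cur]) c
          = f :: pvAppendLast ((g :: gs) ++ [cur]) c := rfl
      rw [h1, ih]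
      simp

theorem pvOfList_ne_dash (c : Char) (h : c ≠ '-') : String.ofList [c] ≠ "-" := by
  intro he
  have := congrArg String.toList he
  simp at this
  exact h this

-- the `last` value after folding a list: unchanged if empty, else single-char string of its last element
def pvLastStr (w : List Char) (last : String) : String :=
  match w.getLast? with
  | none => last
  | some c => String.ofList [c]

-- folding a run of non-dash characters appends them all to the current (last) sublist
theorem pvFold_nondash (w : List Char) (hw : ∀ c ∈ w, c ≠ '-') :
    ∀ (front : List (List Char)) (cur : List Char) (last : String),
    List.foldl pvStepA (front ++ [cur], last) w = (front ++ [cur ++ w], pvLastStr w last) := by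
  induction w with
  | nil => intro front cur last; simp [pvLastStr]
  | cons c w' ih =>
    intro front cur last
    have hc : c ≠ '-' := hw c (by simp)
    have hstep : pvStepA (front ++ [cur], last) c = (front ++ [cur ++ [c]], String.ofList [c]) := by
      simp [pvStepA, hc, pvAppendLast_eq]
    rw [List.foldl_cons, hstep, ih (fun x hx => hw x (by simp [hx]))]
    simp only [Prod.mk.injEq]
    refine ⟨by simp, ?_⟩
    cases hw' : w'.getLast? with
    | none =>
      have : w' = [] := by simpa using hw'
      subst this
      simp [pvLastStr]
    | some d =>
      have hcons : (c :: w').getLast? = some d := by simp [List.getLast?_cons, hw']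
      simp [pvLastStr, hw', hcons]

-- folding a run of dashes while last == '-' appends them all to the current sublist
theorem pvFold_dash (d : List Char) (hd : ∀ c ∈ d, c = '-') :
    ∀ (front : List (List Char)) (cur : List Char),
    List.foldl pvStepA (front ++ [cur], "-") d = (front ++ [cur ++ d], "-") := by
  induction d with
  | nil => intro front cur; simp
  | cons c d' ih =>
    intro front cur
    have hc : c = '-' := hd c (by simp)
    subst hc
    have hstep : pvStepA (front ++ [cur], "-") '-' = (front ++ [cur ++ ['-']], String.ofList ['-']) := by
      simp [pvStepA, pvAppendLast_eq]
    have hdash : String.ofList ['-'] = "-" := by decide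
    rw [List.foldl_cons, hstep, hdash, ih (fun x hx => hd x (by simp [hx]))]
    simp

theorem pvHeadDrop {p : Char → Bool} {l : List Char} {c : Char} {rest : List Char}
    (h : l.dropWhile p = c :: rest) : p c = false := by
  induction l with
  | nil => simp at h
  | cons a l' ih =>
    by_cases ha : p a
    · exact ih (by simpa [List.dropWhile_cons, ha] using h)
    · rw [List.dropWhile_cons, if_neg (by simpa using ha)] at h
      cases h
      simpa using ha

theorem pvLastStr_ne_dash (w : List Char) (last : String)
    (hw : ∀ c ∈ w, c ≠ '-') (hl : last ≠ "-") : pvLastStr w last ≠ "-" := by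
  cases hg : w.getLast? with
  | none => simpa [pvLastStr, hg] using hl
  | some c =>
    have hc : c ∈ w := List.mem_of_getLast? hg
    simpa [pvLastStr, hg] using pvOfList_ne_dash c (hw c hc)

-- main invariant: A's fold from state (front ++ [cur], last) with last ≠ "-" produces
-- front tokens, then cur extended by the next non-dash run, then B's go-loop tokens
theorem pvMain : ∀ (n : Nat) (cs : List Char), cs.length ≤ n →
    ∀ (front : List (List Char)) (cur : List Char) (last : String), last ≠ "-" →
    (List.foldl pvStepA (front ++ [cur], last) cs).1.map (fun subli => String.ofList subli)
      = front.map (fun subli => String.ofList subli)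
        ++ (String.ofList (cur ++ cs.takeWhile (fun x => x != '-'))
            :: pvGo (cs.dropWhile (fun x => x != '-'))) := by
  intro n
  induction n with
  | zero =>
    intro cs hcs front cur last hl
    have : cs = [] := by
      cases cs with
      | nil => rfl
      | cons a l => simp at hcs
    subst this
    simp [pvGo]
  | succ n ih =>
    intro cs hcs front cur last hl
    set w := cs.takeWhile (fun x => x != '-') with hw
    set rest := cs.dropWhile (fun x => x != '-') with hrest
    have hsplit : w ++ rest = cs := List.takeWhile_append_dropWhile
    have hwnd : ∀ c ∈ w, c ≠ '-' := by
      intro c hc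
      have := List.mem_takeWhile_imp hc
      simpa using this
    have hfold1 : List.foldl pvStepA (front ++ [cur], last) cs
        = List.foldl pvStepA (front ++ [cur ++ w], pvLastStr w last) rest := by
      rw [← hsplit, List.foldl_append, pvFold_nondash w hwnd]
    have hl' : pvLastStr w last ≠ "-" := pvLastStr_ne_dash w last hwnd hl
    cases hr : rest with
    | nil =>
      rw [hfold1, hr]
      simp [pvGo]
    | cons c rest2 =>
      have hcdash : c = '-' := by
        have := pvHeadDrop (hrest ▸ hr)
        simpa using this
      subst hcdash
      -- one step: new token ['-']
      have hstep : pvStepA (front ++ [cur ++ w], pvLastStr w last) '-'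
          = ((front ++ [cur ++ w]) ++ [['-']], String.ofList ['-']) := by
        simp [pvStepA, hl']
      have hdash : String.ofList ['-'] = "-" := by decide
      set d := rest2.takeWhile (fun x => x == '-') with hd
      set rest3 := rest2.dropWhile (fun x => x == '-') with hrest3
      have hsplit2 : d ++ rest3 = rest2 := List.takeWhile_append_dropWhile
      have hdall : ∀ x ∈ d, x = '-' := by
        intro x hx
        have := List.mem_takeWhile_imp hx
        simpa using this
      set w2 := rest3.takeWhile (fun x => x != '-') with hw2
      set rest4 := rest3.dropWhile (fun x => x != '-') with hrest4
      have hsplit3 : w2 ++ rest4 = rest3 := List.takeWhile_append_dropWhile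
      have hw2nd : ∀ x ∈ w2, x ≠ '-' := by
        intro x hx
        have := List.mem_takeWhile_imp hx
        simpa using this
      have hfold2 : List.foldl pvStepA (front ++ [cur ++ w], pvLastStr w last) ('-' :: rest2)
          = List.foldl pvStepA ((front ++ [cur ++ w]) ++ [('-' :: d) ++ w2], pvLastStr w2 "-") rest4 := by
        rw [List.foldl_cons, hstep, hdash, ← hsplit2, List.foldl_append,
          pvFold_dash d hdall, ← hsplit3, List.foldl_append, pvFold_nondash w2 hw2nd]
        simp
      -- compute B's pvGo on ('-' :: rest2)
      have hgo : pvGo ('-' :: rest2) = String.ofList (('-' :: d) ++ w2) :: pvGo rest4 := by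
        rw [pvGo]
        have h1 : ('-' :: rest2).takeWhile (fun x => x == '-') = '-' :: d := by
          simp [hd]
        have h2 : ('-' :: rest2).dropWhile (fun x => x == '-') = rest3 := by
          simp [hrest3]
        simp only [h1, h2, ← hw2, ← hrest4]
      rw [hfold1, hr, hfold2, hgo]
      cases hr4 : rest4 with
      | nil =>
        simp [pvGo]
      | cons c4 rest5 =>
        -- head of rest4 is a dash; the third run w2 is nonempty so the new last ≠ "-"
        have hc4 : c4 = '-' := by
          have := pvHeadDrop (hrest4 ▸ hr4)
          simpa using this
        have hrest3ne : rest3 ≠ [] := by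
          intro h
          rw [hrest4, h] at hr4
          simp at hr4
        have hl'' : pvLastStr w2 "-" ≠ "-" := by
          cases hr3 : rest3 with
          | nil => exact absurd hr3 hrest3ne
          | cons c3 rest3' =>
            have hc3 : c3 ≠ '-' := by
              have := pvHeadDrop (hrest3 ▸ hr3)
              simpa using this
            have hw2ne : w2 ≠ [] := by
              rw [hw2, hr3, List.takeWhile_cons, if_pos (by simpa using hc3)]
              simp
            cases hg : w2.getLast? with
            | none => exact absurd (by simpa using hg) hw2ne
            | some e =>
              have he : e ∈ w2 := List.mem_of_getLast? hg
              simpa [pvLastStr, hg] using pvOfList_ne_dash e (hw2nd e he)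
        have hlen : rest4.length ≤ n := by
          have h0 : w.length + (1 + (d.length + (w2.length + rest4.length))) = cs.length := by
            rw [← hsplit, hr, ← hsplit2, ← hsplit3]
            simp
            omega
          omega
        have := ih rest4 hlen (front ++ [cur ++ w]) (('-' :: d) ++ w2) (pvLastStr w2 "-") hl''
        rw [hr4] at this
        have ht4 : (c4 :: rest5).takeWhile (fun x => x != '-') = [] := by
          rw [List.takeWhile_cons, hc4]
          simp
        have hd4 : (c4 :: rest5).dropWhile (fun x => x != '-') = c4 :: rest5 := by
          rw [List.dropWhile_cons, hc4]
          simp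
        rw [ht4, hd4] at this
        rw [this]
        simp

-- ===== VERDICT (by name: the statement is the Claim_ definition above) =====
theorem split_into_list_spec : Claim_equal_split_into_list := by
  intro s _
  unfold Spec_split_into_list split_into_list split_into_list_alt
  have := pvMain s.toList.length s.toList le_rfl [] [] "" (by decide)
  simpa using this
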